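-- pv_equiv track=rewrite | github.com/MJungAktuellis/SystemManager-SageHelper | src/systemmanager_sagehelper/analyzer.py | _normalisiere_discovery_hostliste
-- ===== SOURCE A (Python) =====
-- from typing import Iterable, Protocol
--
-- def _normalisiere_hostname(hostname: str) -> str:
--     """Normalisiert Hostnamen stabil für Vergleich und Deduplizierung.
--
--     Die Normalisierung reduziert FQDN und Kurzname auf denselben Kernwert,
--     damit z. B. ``srv-01`` und ``srv-01.domain.local`` zusammengeführt werden.
--     """
--     bereinigt = hostname.strip().lower().rstrip(".")
--     if not bereinigt:
--         return ""
--     return bereinigt.split(".", maxsplit=1)[0]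
--
-- def _normalisiere_discovery_hostliste(hosts: Iterable[str]) -> list[str]:
--     """Bereinigt und dedupliziert Hostnamen für Discovery-Läufe.
--
--     Die Funktion führt Kurzname/FQDN-Varianten auf einen gemeinsamen Schlüssel
--     zusammen. Für die tatsächliche Prüfung wird bevorzugt die FQDN-Variante
--     behalten, da sie in heterogenen DNS-Umgebungen robuster auflösbar ist.
--     """
--     dedupliziert: dict[str, str] = {}
--     for rohwert in hosts:
--         bereinigt = rohwert.strip().rstrip(".")
--         if not bereinigt:
--             continue
--
--         normalisiert = bereinigt.lower()
--         vergleichsschluessel = _normalisiere_hostname(normalisiert)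
--         if not vergleichsschluessel:
--             continue
--
--         bestehend = dedupliziert.get(vergleichsschluessel)
--         if bestehend is None:
--             dedupliziert[vergleichsschluessel] = normalisiert
--             continue
--
--         # FQDN gewinnt gegenüber Kurzname, damit DNS-Auflösung stabiler bleibt.
--         if "." in normalisiert and "." not in bestehend:
--             dedupliziert[vergleichsschluessel] = normalisiert
--
--     return sorted(dedupliziert.values())
-- ===== SOURCE B (Python) =====
-- def _normalisiere_hostname(hostname: str) -> str:
--     bereinigt = hostname.strip().lower().rstrip(".")
--     if not bereinigt:
--         return ""
--     return bereinigt.split(".", maxsplit=1)[0]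
--
--
-- def _bevorzugt_fqdn(gruppe: list[str]) -> str:
--     """First FQDN in the group if there is one, otherwise the first entry."""
--     for wert in gruppe:
--         if "." in wert:
--             return wert
--     return gruppe[0]
--
--
-- def _normalisiere_discovery_hostliste(hosts):
--     # Pass 1: group every cleaned, lowercased variant under its short-name key.
--     gruppen: dict[str, list[str]] = {}
--     for rohwert in hosts:
--         bereinigt = rohwert.strip().rstrip(".")
--         if not bereinigt:
--             continue
--         normalisiert = bereinigt.lower()
--         schluessel = _normalisiere_hostname(normalisiert)
--         if not schluessel:
--             continue
--         gruppen.setdefault(schluessel, []).append(normalisiert)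
--     # Pass 2: pick one representative per group, then sort.
--     return sorted(_bevorzugt_fqdn(g) for g in gruppen.values())
-- ===== Notes on version B (the rewrite author's own statement) =====
-- stated objective: alternative
-- what changed: Replaces A's incremental best-so-far dict (FQDN overwrites short name during the scan) by a two-pass group-and-select: pass 1 groups all normalized variants per short-name key, pass 2 picks the first FQDN (else first entry) per group, then sorts.
import Mathlib
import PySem

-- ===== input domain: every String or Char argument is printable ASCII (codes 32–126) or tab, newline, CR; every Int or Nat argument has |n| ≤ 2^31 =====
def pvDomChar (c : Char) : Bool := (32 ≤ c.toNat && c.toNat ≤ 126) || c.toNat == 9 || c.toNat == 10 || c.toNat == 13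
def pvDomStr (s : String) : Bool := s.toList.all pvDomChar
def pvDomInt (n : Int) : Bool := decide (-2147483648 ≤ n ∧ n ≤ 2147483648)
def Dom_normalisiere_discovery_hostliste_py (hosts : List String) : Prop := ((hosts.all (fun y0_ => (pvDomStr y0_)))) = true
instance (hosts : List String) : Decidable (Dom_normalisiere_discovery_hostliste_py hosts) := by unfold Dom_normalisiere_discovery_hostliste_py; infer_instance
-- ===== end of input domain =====

-- B replaces A's incremental FQDN-overwrites-short dict by a two-pass group-then-select; same results, similar cost.

-- s.rstrip(".") ported by hand (PySem has no right-only strip with a char set); exact: drops trailing '.' chars.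
def pyRstripDot (s : String) : String := String.mk ((s.toList.reverse.dropWhile (· == '.')).reverse)

-- shared module helper _normalisiere_hostname (used verbatim by both Pythons)
def hostKey (hostname : String) : String :=
  let bereinigt := pyRstripDot (PySem.Str.lower (PySem.Str.strip hostname))
  if bereinigt = "" then ""
  else ((PySem.Str.splitMax? bereinigt "." 1).getD []).headD ""

-- ===== PORT A =====
def stepA (d : PySem.Dict String String) (rohwert : String) : PySem.Dict String String :=
  let bereinigt := pyRstripDot (PySem.Str.strip rohwert)
  if bereinigt = "" then d
  else
    let normalisiert := PySem.Str.lower bereinigt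
    let k := hostKey normalisiert
    if k = "" then d
    else
      match d.get? k with
      | none => d.insert k normalisiert
      | some bestehend =>
        if PySem.Str.isIn "." normalisiert && !(PySem.Str.isIn "." bestehend)
        then d.insert k normalisiert else d

def normalisiere_discovery_hostliste_py (hosts : List String) : List String :=
  PySem.List.sorted (hosts.foldl stepA PySem.Dict.empty).values (fun x => x) false

-- ===== PORT B =====
-- _bevorzugt_fqdn: first FQDN in the group if any, else the first entry
def bevorzugtFqdn (gruppe : List String) : String :=
  match gruppe.find? (fun v => PySem.Str.isIn "." v) with
  | some v => v
  | none => gruppe.headD ""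

def stepB (g : PySem.Dict String (List String)) (rohwert : String) : PySem.Dict String (List String) :=
  let bereinigt := pyRstripDot (PySem.Str.strip rohwert)
  if bereinigt = "" then g
  else
    let normalisiert := PySem.Str.lower bereinigt
    let k := hostKey normalisiert
    if k = "" then g
    else g.insert k ((g.getD k []) ++ [normalisiert])   -- setdefault(k, []).append(v)

def normalisiere_discovery_hostliste_py_alt (hosts : List String) : List String :=
  let gruppen := hosts.foldl stepB PySem.Dict.empty
  PySem.List.sorted (gruppen.values.map bevorzugtFqdn) (fun x => x) false

-- ===== PRECONDITION & SPEC =====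
def Spec_normalisiere_discovery_hostliste_py (hosts : List String) (out : List String) : Prop := out = normalisiere_discovery_hostliste_py_alt hosts
instance (hosts : List String) (out : List String) : Decidable (Spec_normalisiere_discovery_hostliste_py hosts out) := by unfold Spec_normalisiere_discovery_hostliste_py; infer_instance

-- ===== CLAIM (what is proved, stated in full; the proofs are below) =====
def Claim_equal_normalisiere_discovery_hostliste_py : Prop := ∀ (hosts : List String), Dom_normalisiere_discovery_hostliste_py hosts → Spec_normalisiere_discovery_hostliste_py hosts (normalisiere_discovery_hostliste_py hosts)

-- ===== LEMMAS AND PROOFS =====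

-- Invariant tying A's running-best dict to B's group dict after any prefix of hosts.
def AInv (d : PySem.Dict String String) (g : PySem.Dict String (List String)) : Prop :=
  d.keys = g.keys ∧ d.keys.Nodup ∧
  ∀ k, (match g.get? k with
        | none => d.get? k = none
        | some grp => grp ≠ [] ∧ d.get? k = some (bevorzugtFqdn grp))

theorem ainv_empty : AInv PySem.Dict.empty PySem.Dict.empty := by
  refine ⟨rfl, List.nodup_nil, ?_⟩
  intro k; simp [PySem.Dict.get?_empty]

theorem sel_append (grp : List String) (v best : String) (hne : grp ≠ [])
    (hbest : best = bevorzugtFqdn grp) :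
    bevorzugtFqdn (grp ++ [v]) =
      (if PySem.Str.isIn "." v && !(PySem.Str.isIn "." best) then v else best) := by
  subst hbest
  unfold bevorzugtFqdn
  rw [List.find?_append]
  cases hf : grp.find? (fun v => PySem.Str.isIn "." v) with
  | some w =>
    have hw : PySem.Str.isIn "." w = true := List.find?_some hf
    rw [Option.some_or]
    show w = _
    rw [hw]; simp
  | none =>
    rw [Option.none_or]
    match grp, hne with
    | a :: t, _ =>
      have ha : ¬ (PySem.Str.isIn "." a) = true :=
        List.find?_eq_none.mp hf a (List.mem_cons_self)
      cases hv : PySem.Str.isIn "." v with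
      | true =>
        rw [List.find?_cons_of_pos (by simpa using hv)]
        show v = if (true && !PySem.Str.isIn "." a) = true then v else a
        rw [Bool.eq_false_iff.mpr ha]
        simp
      | false =>
        rw [List.find?_cons_of_neg (by simpa using hv)]
        show a = if (false && !PySem.Str.isIn "." a) = true then a else a
        simp

theorem sel_singleton (v : String) : bevorzugtFqdn [v] = v := by
  unfold bevorzugtFqdn
  cases hv : PySem.Str.isIn "." v with
  | true => rw [List.find?_cons_of_pos (by simpa using hv)]
  | false => rw [List.find?_cons_of_neg (by simpa using hv)]; rfl

theorem step_core (d : PySem.Dict String String) (g : PySem.Dict String (List String))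
    (h : AInv d g) (k v : String) :
    AInv (match d.get? k with
          | none => d.insert k v
          | some bestehend =>
            if PySem.Str.isIn "." v && !(PySem.Str.isIn "." bestehend)
            then d.insert k v else d)
         (g.insert k ((g.getD k []) ++ [v])) := by
  obtain ⟨hkeys, hnd, hrel⟩ := h
  have hrelk := hrel k
  cases hg : g.get? k with
  | none =>
    have hd : d.get? k = none := by simpa [hg] using hrelk
    have hcd : d.contains k = false := by
      rw [PySem.Dict.contains_eq_isSome_get?, hd]; rfl
    have hcg : g.contains k = false := by
      rw [PySem.Dict.contains_eq_isSome_get?, hg]; rfl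
    have hgetD : g.getD k [] = [] := by rw [PySem.Dict.getD_eq_get?_getD, hg]; rfl
    rw [hd, hgetD]
    refine ⟨?_, ?_, ?_⟩
    · rw [PySem.Dict.keys_insert_of_not_contains _ _ hcd,
        PySem.Dict.keys_insert_of_not_contains _ _ hcg, hkeys]
    · rw [PySem.Dict.keys_insert_of_not_contains _ _ hcd]
      refine List.Nodup.append hnd (List.nodup_singleton k) ?_
      intro a ha hb
      simp at hb; subst hb
      exact absurd ((PySem.Dict.contains_iff_mem_keys _ _).mpr ha) (by simp [hcd])
    · intro j
      by_cases hj : j = k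
      · subst hj
        rw [PySem.Dict.get?_insert_self, PySem.Dict.get?_insert_self]
        exact ⟨by simp, by rw [List.nil_append, sel_singleton]⟩
      · rw [PySem.Dict.get?_insert_of_ne _ _ hj, PySem.Dict.get?_insert_of_ne _ _ hj]
        exact hrel j
  | some grp =>
    obtain ⟨hne, hd⟩ : grp ≠ [] ∧ d.get? k = some (bevorzugtFqdn grp) := by
      simpa [hg] using hrelk
    have hcd : d.contains k = true := by
      rw [PySem.Dict.contains_eq_isSome_get?, hd]; rfl
    have hcg : g.contains k = true := by
      rw [PySem.Dict.contains_eq_isSome_get?, hg]; rfl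
    have hgetD : g.getD k [] = grp := by rw [PySem.Dict.getD_eq_get?_getD, hg]; rfl
    rw [hd, hgetD]
    show AInv (if (PySem.Str.isIn "." v && !(PySem.Str.isIn "." (bevorzugtFqdn grp))) = true
               then d.insert k v else d) (g.insert k (grp ++ [v]))
    have hkeysB : (g.insert k (grp ++ [v])).keys = g.keys :=
      PySem.Dict.keys_insert_of_contains _ _ hcg
    by_cases hc : (PySem.Str.isIn "." v && !(PySem.Str.isIn "." (bevorzugtFqdn grp))) = true
    · rw [if_pos hc]
      refine ⟨?_, ?_, ?_⟩
      · rw [PySem.Dict.keys_insert_of_contains _ _ hcd, hkeysB, hkeys]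
      · rw [PySem.Dict.keys_insert_of_contains _ _ hcd]; exact hnd
      · intro j
        by_cases hj : j = k
        · subst hj
          rw [PySem.Dict.get?_insert_self, PySem.Dict.get?_insert_self]
          refine ⟨by simp, ?_⟩
          rw [sel_append grp v _ hne rfl, hc]
          simp
        · rw [PySem.Dict.get?_insert_of_ne _ _ hj, PySem.Dict.get?_insert_of_ne _ _ hj]
          exact hrel j
    · rw [if_neg hc]
      refine ⟨by rw [hkeysB, hkeys], hnd, ?_⟩
      intro j
      by_cases hj : j = k
      · subst hj
        rw [PySem.Dict.get?_insert_self, hd]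
        refine ⟨by simp, ?_⟩
        rw [sel_append grp v _ hne rfl, if_neg hc]
      · rw [PySem.Dict.get?_insert_of_ne _ _ hj]
        exact hrel j

theorem ainv_step (d : PySem.Dict String String) (g : PySem.Dict String (List String))
    (h : AInv d g) (x : String) : AInv (stepA d x) (stepB g x) := by
  simp only [stepA, stepB]
  by_cases h1 : pyRstripDot (PySem.Str.strip x) = ""
  · rw [if_pos h1, if_pos h1]; exact h
  · rw [if_neg h1, if_neg h1]
    by_cases h2 : hostKey (PySem.Str.lower (pyRstripDot (PySem.Str.strip x))) = ""
    · rw [if_pos h2, if_pos h2]; exact h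
    · rw [if_neg h2, if_neg h2]
      exact step_core d g h _ _

theorem ainv_fold (hosts : List String) :
    AInv (hosts.foldl stepA PySem.Dict.empty) (hosts.foldl stepB PySem.Dict.empty) := by
  suffices h : ∀ d g, AInv d g → AInv (hosts.foldl stepA d) (hosts.foldl stepB g) from
    h _ _ ainv_empty
  induction hosts with
  | nil => intro d g h; exact h
  | cons x xs ih =>
    intro d g h
    rw [List.foldl_cons, List.foldl_cons]
    exact ih _ _ (ainv_step d g h x)

theorem values_eq (d : PySem.Dict String String) (g : PySem.Dict String (List String))
    (h : AInv d g) : d.values = g.values.map bevorzugtFqdn := by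
  obtain ⟨hkeys, hnd, hrel⟩ := h
  have hndg : g.keys.Nodup := hkeys ▸ hnd
  rw [PySem.Dict.values_eq_map_keys d hnd "", PySem.Dict.values_eq_map_keys g hndg [],
    List.map_map, hkeys]
  refine List.map_congr_left ?_
  intro k hkmem
  have hcg : g.contains k = true := (PySem.Dict.contains_iff_mem_keys _ _).mpr hkmem
  cases hg : g.get? k with
  | none =>
    exact absurd hcg (by rw [PySem.Dict.contains_eq_isSome_get?, hg]; simp)
  | some grp =>
    obtain ⟨_, hd⟩ : grp ≠ [] ∧ d.get? k = some (bevorzugtFqdn grp) := by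
      simpa [hg] using hrel k
    have h1 : d.getD k "" = bevorzugtFqdn grp := by
      rw [PySem.Dict.getD_eq_get?_getD, hd]; rfl
    have h2 : g.getD k [] = grp := by
      rw [PySem.Dict.getD_eq_get?_getD, hg]; rfl
    simp [h1, h2]

-- ===== VERDICT (by name: the statement is the Claim_ definition above) =====
theorem normalisiere_discovery_hostliste_py_spec : Claim_equal_normalisiere_discovery_hostliste_py := by
  intro hosts _
  unfold Spec_normalisiere_discovery_hostliste_py
  unfold normalisiere_discovery_hostliste_py normalisiere_discovery_hostliste_py_alt
  rw [values_eq _ _ (ainv_fold hosts)]
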